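-- pv_equiv track=rewrite | github.com/Demolin951/Learning | coin flip.py | count_consecutive_numbers
-- ===== SOURCE A (Python) =====
-- def count_consecutive_numbers(lst):
--     count = 0
--     count1 = 0
--     for i in range(1,len(lst)):
--         if lst[i] == lst[i - 1]:
--             count += 1
--         else:
--             count = 0
--         if count == 5:
--             count1 += 1
--     return count1
-- ===== SOURCE B (Python) =====
-- def count_consecutive_numbers(lst):
--     # Segment the list into maximal runs of equal elements and count
--     # the runs of length >= 6 (A's count==5 trigger fires once per such run).
--     total = 0
--     i = 0
--     n = len(lst)
--     while i < n:
--         j = i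
--         while j < n and lst[j] == lst[i]:
--             j += 1
--         if j - i >= 6:
--             total += 1
--         i = j
--     return total
-- ===== Notes on version B (the rewrite author's own statement) =====
-- stated objective: alternative
-- what changed: B segments the list into maximal runs of equal elements with a two-pointer scan and counts runs of length >= 6, instead of A's inline running match-counter that fires when it hits exactly 5.
import Mathlib
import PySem

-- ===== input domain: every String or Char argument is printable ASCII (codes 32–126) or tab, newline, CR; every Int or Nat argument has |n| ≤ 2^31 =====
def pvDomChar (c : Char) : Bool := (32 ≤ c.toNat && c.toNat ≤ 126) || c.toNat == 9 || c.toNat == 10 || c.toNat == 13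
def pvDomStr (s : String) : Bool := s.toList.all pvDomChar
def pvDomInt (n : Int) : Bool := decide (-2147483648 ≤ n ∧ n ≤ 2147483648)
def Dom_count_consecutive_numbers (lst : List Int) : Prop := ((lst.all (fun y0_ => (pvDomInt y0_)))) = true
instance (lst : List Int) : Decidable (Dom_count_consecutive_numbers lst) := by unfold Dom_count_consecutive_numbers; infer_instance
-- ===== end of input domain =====

-- B replaces A's inline running match-counter (fires at count == 5) by a two-pointer
-- scan over maximal runs of equal elements, counting runs of length ≥ 6 (objective: alternative).

-- ===== PORT A =====
def count_consecutive_numbers (lst : List Int) : Int :=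
  ((PySem.List.pyRange 1 (PySem.List.len lst) 1).foldl
    (fun (st : Int × Int) i =>
      let count := if PySem.List.pyGetD lst i 0 = PySem.List.pyGetD lst (i - 1) 0 then st.1 + 1 else (0 : Int)
      let count1 := if count = 5 then st.2 + 1 else st.2
      (count, count1)) ((0 : Int), (0 : Int))).2

-- ===== PORT B =====
-- inner while loop of B: advance j while j < n and lst[j] == v
-- (fuel = remaining iterations, lst.length - j at the call site; it only makes the loop total)
def pvRunEnd (lst : List Int) (v : Int) : Nat → Nat → Nat
  | 0, j => j
  | fuel + 1, j =>
      if h : j < lst.length then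
        if lst[j] = v then pvRunEnd lst v fuel (j + 1) else j
      else j

-- outer while loop of B: scan run by run, counting runs of length ≥ 6
def pvCountRuns (lst : List Int) : Nat → Nat → Int
  | 0, _ => 0
  | fuel + 1, i =>
      if h : i < lst.length then
        let j := pvRunEnd lst lst[i] (lst.length - i) i
        (if j - i ≥ 6 then (1 : Int) else 0) + pvCountRuns lst fuel j
      else 0

def count_consecutive_numbers_alt (lst : List Int) : Int := pvCountRuns lst lst.length 0

-- ===== PRECONDITION & SPEC =====
def Spec_count_consecutive_numbers (lst : List Int) (out : Int) : Prop := out = count_consecutive_numbers_alt lst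
instance (lst : List Int) (out : Int) : Decidable (Spec_count_consecutive_numbers lst out) := by unfold Spec_count_consecutive_numbers; infer_instance

-- ===== CLAIM (what is proved, stated in full; the proofs are below) =====
def Claim_equal_count_consecutive_numbers : Prop := ∀ (lst : List Int), Dom_count_consecutive_numbers lst → Spec_count_consecutive_numbers lst (count_consecutive_numbers lst)

-- ===== LEMMAS AND PROOFS =====

-- reference counter: number of maximal runs of equal elements of length ≥ 6
def countRuns6 : List Int → Int
  | [] => 0
  | x :: xs =>
      (if (xs.takeWhile (· = x)).length + 1 ≥ 6 then (1 : Int) else 0) +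
        countRuns6 (xs.dropWhile (· = x))
termination_by l => l.length
decreasing_by
  have := xs.length_dropWhile_le (p := (· = x))
  simp
  omega

theorem countRuns6_nil : countRuns6 [] = 0 := by simp [countRuns6]

theorem countRuns6_cons (x : Int) (xs : List Int) :
    countRuns6 (x :: xs)
      = (if (xs.takeWhile (· = x)).length + 1 ≥ 6 then (1 : Int) else 0)
          + countRuns6 (xs.dropWhile (· = x)) := by
  rw [countRuns6.eq_def]

-- A's loop body as a structural fold over (previous element, current element)
def pairFoldA : Int → List Int → (Int × Int) → (Int × Int)
  | _, [], st => st
  | prev, x :: rest, st =>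
      let count := if x = prev then st.1 + 1 else (0 : Int)
      let count1 := if count = 5 then st.2 + 1 else st.2
      pairFoldA x rest (count, count1)

theorem dropWhile_eq_drop_length_takeWhile (p : Int → Bool) (l : List Int) :
    l.dropWhile p = l.drop (l.takeWhile p).length := by
  induction l with
  | nil => simp
  | cons x xs ih =>
      by_cases h : p x
      · simp [h, ih]
      · simp [h]

theorem pvRunEnd_eq (lst : List Int) (v : Int) : ∀ (fuel j : Nat), lst.length - j ≤ fuel →
    pvRunEnd lst v fuel j = j + ((lst.drop j).takeWhile (· = v)).length := by
  intro fuel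
  induction fuel with
  | zero =>
      intro j hf
      rw [pvRunEnd, List.drop_eq_nil_of_le (by omega)]
      simp
  | succ fuel ih =>
      intro j hf
      rw [pvRunEnd]
      by_cases h : j < lst.length
      · rw [dif_pos h]
        by_cases hv : lst[j] = v
        · rw [if_pos hv, ih (j + 1) (by omega), List.drop_eq_getElem_cons h,
              List.takeWhile_cons_of_pos (by simp [hv]), List.length_cons]
          omega
        · rw [if_neg hv, List.drop_eq_getElem_cons h, List.takeWhile_cons]
          simp [hv]
      · rw [dif_neg h, List.drop_eq_nil_of_le (by omega)]
        simp

theorem pvCountRuns_eq (lst : List Int) : ∀ (fuel i : Nat), lst.length - i ≤ fuel →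
    pvCountRuns lst fuel i = countRuns6 (lst.drop i) := by
  intro fuel
  induction fuel with
  | zero =>
      intro i hf
      rw [pvCountRuns, List.drop_eq_nil_of_le (by omega), countRuns6_nil]
  | succ fuel ih =>
      intro i hf
      rw [pvCountRuns]
      by_cases h : i < lst.length
      · rw [dif_pos h]
        have hdrop : lst.drop i = lst[i] :: lst.drop (i + 1) := List.drop_eq_getElem_cons h
        have hlen : pvRunEnd lst lst[i] (lst.length - i) i
            = i + 1 + ((lst.drop (i + 1)).takeWhile (· = lst[i])).length := by
          rw [pvRunEnd_eq lst lst[i] (lst.length - i) i (by omega), hdrop,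
              List.takeWhile_cons_of_pos (by simp), List.length_cons]
          omega
        have hdw : lst.drop (pvRunEnd lst lst[i] (lst.length - i) i)
            = (lst.drop (i + 1)).dropWhile (· = lst[i]) := by
          rw [dropWhile_eq_drop_length_takeWhile, hlen, ← List.drop_drop]
        show (if pvRunEnd lst lst[i] (lst.length - i) i - i ≥ 6 then (1 : Int) else 0)
            + pvCountRuns lst fuel (pvRunEnd lst lst[i] (lst.length - i) i) = countRuns6 (lst.drop i)
        rw [ih _ (by omega), hdw, hdrop, countRuns6_cons]
        have hcond : pvRunEnd lst lst[i] (lst.length - i) i - i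
            = ((lst.drop (i + 1)).takeWhile (· = lst[i])).length + 1 := by omega
        rw [hcond]
      · rw [dif_neg h, List.drop_eq_nil_of_le (by omega), countRuns6_nil]

-- main invariant for A's fold: c = number of adjacent matches so far in the current run
theorem pairFoldA_eq (rest : List Int) : ∀ (prev c t : Int), 0 ≤ c →
    (pairFoldA prev rest (c, t)).2
      = t + (if c ≤ 4 ∧ c + ((rest.takeWhile (· = prev)).length : Int) ≥ 5 then 1 else 0)
          + countRuns6 (rest.dropWhile (· = prev)) := by
  induction rest with
  | nil =>
      intro prev c t _
      simp [pairFoldA, countRuns6_nil]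
      omega
  | cons x rest ih =>
      intro prev c t hc
      by_cases hx : x = prev
      · have htw : ((x :: rest).takeWhile (· = prev)) = x :: rest.takeWhile (· = x) := by
          rw [List.takeWhile_cons]; simp [hx]
        have hdw : ((x :: rest).dropWhile (· = prev)) = rest.dropWhile (· = x) := by
          rw [List.dropWhile_cons]; simp [hx]
        simp only [pairFoldA, if_pos hx]
        rw [ih x (c + 1) _ (by omega), htw, hdw]
        simp only [List.length_cons]
        push_cast
        split_ifs <;> omega
      · have htw : ((x :: rest).takeWhile (· = prev)) = [] := by
          rw [List.takeWhile_cons]; simp [hx]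
        have hdw : ((x :: rest).dropWhile (· = prev)) = x :: rest := by
          rw [List.dropWhile_cons]; simp [hx]
        simp only [pairFoldA, if_neg hx]
        rw [ih x 0 _ (by omega), htw, hdw, countRuns6_cons]
        simp only [List.length_nil]
        push_cast
        simp only [true_and]
        split_ifs <;> omega

-- index elimination for A's fold over range(1, len(lst))
theorem A_idx (lst : List Int) (k : Nat) (hk : k < lst.length) : ∀ (st : Int × Int),
    (PySem.List.pyRange ((k : Int) + 1) (PySem.List.len lst) 1).foldl
      (fun (st : Int × Int) i =>
        let count := if PySem.List.pyGetD lst i 0 = PySem.List.pyGetD lst (i - 1) 0 then st.1 + 1 else (0 : Int)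
        let count1 := if count = 5 then st.2 + 1 else st.2
        (count, count1)) st
      = pairFoldA lst[k] (lst.drop (k + 1)) st := by
  induction hn : lst.length - (k + 1) generalizing k with
  | zero =>
      intro st
      rw [PySem.List.pyRange_one_eq_nil (by simp [PySem.List.len_eq]; omega)]
      rw [List.drop_eq_nil_of_le (by omega)]
      rfl
  | succ n ih =>
      intro st
      have hk1 : k + 1 < lst.length := by omega
      rw [PySem.List.pyRange_one_cons (by simp [PySem.List.len_eq]; exact_mod_cast hk1)]
      rw [List.foldl_cons]
      have e1 : PySem.List.pyGetD lst ((k : Int) + 1) 0 = lst[k + 1] := by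
        have : ((k : Int) + 1) = ((k + 1 : Nat) : Int) := by push_cast; ring
        rw [this, PySem.List.pyGetD_natCast]
        simp [hk1]
      have e2 : PySem.List.pyGetD lst ((k : Int) + 1 - 1) 0 = lst[k] := by
        have : ((k : Int) + 1 - 1) = ((k : Nat) : Int) := by ring
        rw [this, PySem.List.pyGetD_natCast]
        simp [hk]
      have hcast : ((k : Int) + 1 + 1) = ((k + 1 : Nat) : Int) + 1 := by push_cast; ring
      rw [e1, e2, hcast, ih (k + 1) hk1 (by omega)]
      rw [List.drop_eq_getElem_cons hk1]
      rfl

-- ===== VERDICT (by name: the statement is the Claim_ definition above) =====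
theorem count_consecutive_numbers_spec : Claim_equal_count_consecutive_numbers := by
  intro lst _
  unfold Spec_count_consecutive_numbers count_consecutive_numbers count_consecutive_numbers_alt
  rw [pvCountRuns_eq lst lst.length 0 (by omega), List.drop_zero]
  cases lst with
  | nil =>
      rw [PySem.List.pyRange_one_eq_nil (by simp [PySem.List.len_eq])]
      simp [countRuns6_nil]
  | cons x xs =>
      have h0 : (0 : Nat) < (x :: xs).length := by simp
      rw [show PySem.List.pyRange 1 (PySem.List.len (x :: xs)) 1
            = PySem.List.pyRange (((0 : Nat) : Int) + 1) (PySem.List.len (x :: xs)) 1 from by norm_num]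
      rw [A_idx (x :: xs) 0 h0]
      simp only [List.getElem_cons_zero, List.drop_succ_cons, List.drop_zero]
      rw [pairFoldA_eq xs x 0 0 (by omega), countRuns6_cons]
      push_cast
      simp only [true_and]
      split_ifs <;> omega
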